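-- pv_equiv track=rewrite | github.com/TommyOd/ENT3R_elevattester | main.py | oppmoter_mulige
-- ===== SOURCE A (Python) =====
-- def oppmoter_mulige(global_dict, elev_oppmoter):
--     """
--     Returns the percentage of possible since first oppmøte.
--     """
--     possible = 0
--     started = False
--
--     first_week, first_year = elev_oppmoter[0]
--
--     for year, weeks in global_dict.items():
--         for week in weeks:
--
--             if (week >= first_week) and (year >=first_year):
--                 started = True
--             if started:
--                 possible += 1
--     return len(set(elev_oppmoter)), possible
-- ===== SOURCE B (Python) =====
-- def oppmoter_mulige(global_dict, elev_oppmoter):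
--     """
--     Returns the percentage of possible since first oppmøte.
--     """
--     first_week, first_year = elev_oppmoter[0]
--
--     flattened = [(year, week) for year, weeks in global_dict.items()
--                  for week in weeks]
--     possible = 0
--     for i, (year, week) in enumerate(flattened):
--         if week >= first_week and year >= first_year:
--             possible = len(flattened) - i
--             break
--     return len(set(elev_oppmoter)), possible
-- ===== Notes on version B (the rewrite author's own statement) =====
-- stated objective: alternative
-- what changed: Replaces the nested dict/weeks loop carrying a sticky 'started' flag and an increment-per-iteration counter with a flatten-then-scan: build the flattened (year, week) list once, find the first qualifying index i with an early break, and compute possible = len(flattened) - i arithmetically.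
import Mathlib
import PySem

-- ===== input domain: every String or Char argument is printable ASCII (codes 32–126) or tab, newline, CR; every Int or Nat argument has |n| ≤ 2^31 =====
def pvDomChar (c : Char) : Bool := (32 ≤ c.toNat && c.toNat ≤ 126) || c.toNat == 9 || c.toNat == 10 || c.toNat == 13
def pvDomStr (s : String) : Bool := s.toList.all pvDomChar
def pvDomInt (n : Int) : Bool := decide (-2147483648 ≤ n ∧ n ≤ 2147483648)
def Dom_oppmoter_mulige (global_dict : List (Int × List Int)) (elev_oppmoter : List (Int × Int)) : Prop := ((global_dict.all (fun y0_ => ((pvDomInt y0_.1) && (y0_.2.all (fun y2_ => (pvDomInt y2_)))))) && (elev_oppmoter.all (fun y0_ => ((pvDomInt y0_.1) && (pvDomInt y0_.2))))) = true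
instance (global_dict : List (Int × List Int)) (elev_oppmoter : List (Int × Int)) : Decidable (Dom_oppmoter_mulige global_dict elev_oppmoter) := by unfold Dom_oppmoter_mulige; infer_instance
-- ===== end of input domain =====

-- B replaces the nested loop with a sticky 'started' flag by flatten + first-qualifying-index arithmetic (alternative decomposition, same cost).


-- ===== PORT A =====
def oppmoter_mulige (global_dict : List (Int × List Int)) (elev_oppmoter : List (Int × Int)) : Int × Int :=
  match PySem.List.pyGet? elev_oppmoter 0 with
  | none => (0, 0)  -- IndexError in Python; excluded by Pre_
  | some fst =>
    let st := global_dict.foldl (fun (st : Int × Bool) yw =>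
      yw.2.foldl (fun (st : Int × Bool) week =>
        let started := st.2 || (decide (week ≥ fst.1) && decide (yw.1 ≥ fst.2))
        (if started then st.1 + 1 else st.1, started)) st) (0, false)
    (((PySem.Set.ofList elev_oppmoter).length : Int), st.1)

-- ===== PORT B =====
def oppmoter_mulige_alt (global_dict : List (Int × List Int)) (elev_oppmoter : List (Int × Int)) : Int × Int :=
  match PySem.List.pyGet? elev_oppmoter 0 with
  | none => (0, 0)  -- IndexError in Python; excluded by Pre_
  | some fst =>
    let flattened := global_dict.flatMap (fun yw => yw.2.map (fun w => (yw.1, w)))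
    let possible : Int :=
      match flattened.findIdx? (fun p => decide (p.2 ≥ fst.1) && decide (p.1 ≥ fst.2)) with
      | some i => ((flattened.length : Int) - (i : Int))
      | none => 0
    (((PySem.Set.ofList elev_oppmoter).length : Int), possible)

-- ===== PRECONDITION & SPEC =====
-- Pre_ excludes only the empty attendance list, on which both A and B raise IndexError at elev_oppmoter[0].
def Pre_oppmoter_mulige (global_dict : List (Int × List Int)) (elev_oppmoter : List (Int × Int)) : Prop := elev_oppmoter ≠ []
instance (global_dict : List (Int × List Int)) (elev_oppmoter : List (Int × Int)) : Decidable (Pre_oppmoter_mulige global_dict elev_oppmoter) := by unfold Pre_oppmoter_mulige; infer_instance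
def pvWitness_oppmoter_mulige : (List (Int × List Int)) × (List (Int × Int)) := ([(2020, [1, 2, 3]), (2021, [1, 2])], [(2, 2020), (2, 2020), (1, 2021)])

def Spec_oppmoter_mulige (global_dict : List (Int × List Int)) (elev_oppmoter : List (Int × Int)) (out : Int × Int) : Prop := out = oppmoter_mulige_alt global_dict elev_oppmoter
instance (global_dict : List (Int × List Int)) (elev_oppmoter : List (Int × Int)) (out : Int × Int) : Decidable (Spec_oppmoter_mulige global_dict elev_oppmoter out) := by unfold Spec_oppmoter_mulige; infer_instance

-- ===== CLAIM (what is proved, stated in full; the proofs are below) =====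
def Claim_equal_oppmoter_mulige : Prop := ∀ (global_dict : List (Int × List Int)) (elev_oppmoter : List (Int × Int)), Dom_oppmoter_mulige global_dict elev_oppmoter → Pre_oppmoter_mulige global_dict elev_oppmoter → Spec_oppmoter_mulige global_dict elev_oppmoter (oppmoter_mulige global_dict elev_oppmoter)

-- ===== LEMMAS AND PROOFS =====

-- A's nested fold over (year, weeks) items equals a single fold over the flattened (year, week) list.
theorem pv_fold_flatten (q : Int × Int → Bool) (gd : List (Int × List Int)) (st : Int × Bool) :
    gd.foldl (fun (st : Int × Bool) yw =>
      yw.2.foldl (fun (st : Int × Bool) week =>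
        let started := st.2 || q (yw.1, week)
        (if started then st.1 + 1 else st.1, started)) st) st
    = (gd.flatMap (fun yw => yw.2.map (fun w => (yw.1, w)))).foldl
        (fun (st : Int × Bool) p =>
          let started := st.2 || q p
          (if started then st.1 + 1 else st.1, started)) st := by
  induction gd generalizing st with
  | nil => rfl
  | cons hd tl ih =>
    simp only [List.foldl_cons, List.flatMap_cons, List.foldl_append, List.foldl_map, ih]

-- Once started, every remaining element increments the counter.
theorem pv_fold_started (q : Int × Int → Bool) (l : List (Int × Int)) (c : Int) :
    l.foldl (fun (st : Int × Bool) p =>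
        let started := st.2 || q p
        (if started then st.1 + 1 else st.1, started)) (c, true)
    = (c + l.length, true) := by
  induction l generalizing c with
  | nil => simp
  | cons hd tl ih =>
    have hstep : (let started := ((c : Int), true).2 || q hd
        ((if started then ((c : Int), true).1 + 1 else ((c : Int), true).1, started) : Int × Bool)) = (c + 1, true) := by simp
    rw [List.foldl_cons, hstep, ih]
    simp only [List.length_cons, Prod.mk.injEq, and_true]
    push_cast
    ring

-- Not yet started: the final count is the tail length from the first qualifying index.
theorem pv_fold_main (q : Int × Int → Bool) (l : List (Int × Int)) (c : Int) :
    (l.foldl (fun (st : Int × Bool) p =>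
        let started := st.2 || q p
        (if started then st.1 + 1 else st.1, started)) (c, false)).1
    = c + (match l.findIdx? q with
           | some i => ((l.length : Int) - (i : Int))
           | none => 0) := by
  induction l generalizing c with
  | nil => simp
  | cons hd tl ih =>
    by_cases h : q hd
    · have hstep : (let started := ((c : Int), false).2 || q hd
          ((if started then ((c : Int), false).1 + 1 else ((c : Int), false).1, started) : Int × Bool)) = (c + 1, true) := by
        simp [h]
      rw [List.foldl_cons, hstep, pv_fold_started]
      simp [List.findIdx?_cons, h]
      ring
    · have hstep : (let started := ((c : Int), false).2 || q hd
          ((if started then ((c : Int), false).1 + 1 else ((c : Int), false).1, started) : Int × Bool)) = (c, false) := by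
        simp [h]
      rw [List.foldl_cons, hstep, ih]
      simp only [List.findIdx?_cons, h, Bool.false_eq_true, ite_false]
      cases htl : tl.findIdx? q with
      | none => simp
      | some i => simp

-- ===== VERDICT (by name: the statement is the Claim_ definition above) =====
theorem oppmoter_mulige_spec : Claim_equal_oppmoter_mulige := by
  intro gd eo _ _
  unfold Spec_oppmoter_mulige oppmoter_mulige oppmoter_mulige_alt
  cases hg : PySem.List.pyGet? eo 0 with
  | none => rfl
  | some fst =>
    simp only
    congr 1
    rw [pv_fold_flatten (fun p => decide (p.2 ≥ fst.1) && decide (p.1 ≥ fst.2)) gd (0, false),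
        pv_fold_main]
    simp
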